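-- pv_equiv track=rewrite | github.com/chmp/template-fragments-py | minidoc.py | splice_docs
-- ===== SOURCE A (Python) =====
-- from typing import Any, Iterable, List, Optional, Tuple, Union, cast
--
-- def splice_docs(readme: List[str], docs: List[str]) -> Iterable[str]:
--     in_reference = False
--
--     for line in readme:
--         is_reference_start = line.startswith("## Reference")
--         is_h2_header = line.startswith("## ")
--
--         if not in_reference and not is_reference_start:
--             yield line
--
--         elif not in_reference and is_reference_start:
--             yield line
--             yield from docs
--
--             in_reference = True
--
--         elif in_reference and not is_h2_header:
--             # ignore the line
--             pass
--
--         elif in_reference and is_h2_header: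
--             yield line
--             in_reference = False
-- ===== SOURCE B (Python) =====
-- def splice_docs(readme, docs):
--     out = []
--     i = 0
--     n = len(readme)
--     while i < n:
--         line = readme[i]
--         if line.startswith("## Reference"):
--             out.append(line)
--             out.extend(docs)
--             i += 1
--             # consume the reference section's body
--             while i < n and not readme[i].startswith("## "):
--                 i += 1
--             # emit the terminating '## ' header plainly (never re-tested for reference start)
--             if i < n:
--                 out.append(readme[i])
--                 i += 1
--         else:
--             out.append(line)
--             i += 1
--     return out
-- ===== Notes on version B (the rewrite author's own statement) =====
-- stated objective: alternative
-- what changed: Replaces A's boolean in_reference flag state machine (a single pass where the flag selects among four branches) with an explicit index scan whose inner loop consumes the whole reference-section body at once and then emits the terminating '## ' header without re-testing it.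
import Mathlib
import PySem

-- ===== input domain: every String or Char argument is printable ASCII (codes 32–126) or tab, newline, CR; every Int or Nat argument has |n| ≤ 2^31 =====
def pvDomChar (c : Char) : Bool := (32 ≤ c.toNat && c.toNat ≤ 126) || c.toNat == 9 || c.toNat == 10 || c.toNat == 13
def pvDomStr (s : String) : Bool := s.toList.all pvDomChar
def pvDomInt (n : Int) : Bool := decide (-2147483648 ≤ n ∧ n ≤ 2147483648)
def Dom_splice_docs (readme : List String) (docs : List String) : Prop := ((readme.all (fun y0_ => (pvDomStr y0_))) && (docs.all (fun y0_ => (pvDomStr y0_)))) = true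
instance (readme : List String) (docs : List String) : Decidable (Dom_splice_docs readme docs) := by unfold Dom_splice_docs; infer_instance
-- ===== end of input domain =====

-- ===== PORT A =====
-- B changes only the decomposition (index scan + inner consuming loop instead of a boolean flag); same output.
-- One step of A's loop: state = (in_reference, lines yielded so far).
def spliceStepA (docs : List String) (st : Bool × List String) (line : String) : Bool × List String :=
  let in_reference := st.1
  let acc := st.2
  let is_reference_start := PySem.Str.startswith line "## Reference"
  let is_h2_header := PySem.Str.startswith line "## "
  if !in_reference && !is_reference_start then (in_reference, acc ++ [line])
  else if !in_reference && is_reference_start then (true, acc ++ [line] ++ docs)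
  else if in_reference && !is_h2_header then (in_reference, acc)
  else (false, acc ++ [line])

def splice_docs (readme : List String) (docs : List String) : List String :=
  (readme.foldl (spliceStepA docs) (false, [])).2

-- ===== PORT B =====
-- Outer scan (spliceOutB) and the inner loop consuming a reference section's body
-- then emitting the terminating '## ' header plainly (spliceInB), as in Source B.
mutual
def spliceOutB (docs : List String) : List String → List String
  | [] => []
  | line :: rest =>
    if PySem.Str.startswith line "## Reference" then
      line :: (docs ++ spliceInB docs rest)
    else
      line :: spliceOutB docs rest

def spliceInB (docs : List String) : List String → List String
  | [] => []
  | line :: rest =>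
    if PySem.Str.startswith line "## " then
      line :: spliceOutB docs rest   -- terminating header, emitted without re-testing
    else
      spliceInB docs rest            -- body line of the reference section: skipped
end

def splice_docs_alt (readme : List String) (docs : List String) : List String :=
  spliceOutB docs readme

-- ===== PRECONDITION & SPEC =====
def Spec_splice_docs (readme : List String) (docs : List String) (out : List String) : Prop := out = splice_docs_alt readme docs
instance (readme : List String) (docs : List String) (out : List String) : Decidable (Spec_splice_docs readme docs out) := by unfold Spec_splice_docs; infer_instance

-- ===== CLAIM (what is proved, stated in full; the proofs are below) =====
def Claim_equal_splice_docs : Prop := ∀ (readme : List String) (docs : List String), Dom_splice_docs readme docs → Spec_splice_docs readme docs (splice_docs readme docs)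

-- ===== LEMMAS AND PROOFS =====
theorem spliceA_both (docs : List String) (xs : List String) :
    ∀ acc : List String,
      (xs.foldl (spliceStepA docs) (false, acc)).2 = acc ++ spliceOutB docs xs ∧
      (xs.foldl (spliceStepA docs) (true, acc)).2 = acc ++ spliceInB docs xs := by
  induction xs with
  | nil => intro acc; simp [spliceOutB, spliceInB]
  | cons line rest ih =>
    intro acc
    constructor
    · by_cases h : PySem.Str.startswith line "## Reference" = true
      all_goals simp at h
      · simp [List.foldl, spliceStepA, spliceOutB, h, (ih (acc ++ line :: docs)).2]
      · simp [List.foldl, spliceStepA, spliceOutB, h, (ih (acc ++ [line])).1]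
    · by_cases h : PySem.Str.startswith line "## " = true
      all_goals simp at h
      · by_cases hr : PySem.Str.startswith line "## Reference" = true
        all_goals simp at hr
        all_goals simp [List.foldl, spliceStepA, spliceInB, h, hr, (ih (acc ++ [line])).1]
      · by_cases hr : PySem.Str.startswith line "## Reference" = true
        all_goals simp at hr
        all_goals simp [List.foldl, spliceStepA, spliceInB, h, hr, (ih acc).2]

-- ===== VERDICT (by name: the statement is the Claim_ definition above) =====
theorem splice_docs_spec : Claim_equal_splice_docs := by
  intro readme docs _
  unfold Spec_splice_docs splice_docs splice_docs_alt
  simpa using (spliceA_both docs readme []).1
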